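-- pv_equiv track=rewrite | github.com/vsemi/LIDAR07-100W | tof/sensor.py | _calcCrc32Uint32
-- ===== SOURCE A (Python) =====
-- POLYNOM = 0x04C11DB7
--
-- def _calcCrc32Uint32(crc, data) :
--     crc = crc ^ data
--     for i in range(32) :
--         if crc & 0x80 :
--             crc = (crc << 1) ^ POLYNOM
--         else :
--             crc = crc << 1
--     return(crc)
-- ===== SOURCE B (Python) =====
-- POLYNOM = 0x04C11DB7
--
-- def _byte_crc(b):
--     # A's exact 32-iteration bit loop, run once per byte value at import time
--     for _ in range(32):
--         if b & 0x80:
--             b = (b << 1) ^ POLYNOM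
--         else:
--             b = b << 1
--     return b
--
-- _TABLE = [_byte_crc(b) for b in range(256)]
--
-- def _calcCrc32Uint32(crc, data):
--     x = crc ^ data
--     # only the low byte of x ever drives a POLYNOM xor; all higher bits just shift up by 32
--     return ((x >> 8) << 40) ^ _TABLE[x & 0xFF]
-- ===== Notes on version B (the rewrite author's own statement) =====
-- stated objective: alternative
-- what changed: Replaces the per-call 32-iteration bit loop by a single lookup in a 256-entry table (built once with the same loop) plus a shift, using that only the low byte of crc^data drives any POLYNOM xors while higher bits merely shift up by 32.
import Mathlib
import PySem

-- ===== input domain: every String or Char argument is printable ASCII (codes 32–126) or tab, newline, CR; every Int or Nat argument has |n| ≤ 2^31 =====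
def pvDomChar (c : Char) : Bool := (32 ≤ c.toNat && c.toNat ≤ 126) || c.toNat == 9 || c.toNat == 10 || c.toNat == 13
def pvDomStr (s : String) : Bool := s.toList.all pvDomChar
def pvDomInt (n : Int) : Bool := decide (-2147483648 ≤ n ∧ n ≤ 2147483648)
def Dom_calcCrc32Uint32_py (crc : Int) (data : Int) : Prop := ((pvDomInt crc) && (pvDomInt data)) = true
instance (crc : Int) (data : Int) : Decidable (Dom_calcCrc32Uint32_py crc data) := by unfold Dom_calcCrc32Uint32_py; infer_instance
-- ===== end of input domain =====

-- B replaces A's per-call 32-iteration bit loop by one lookup in a 256-entry table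
-- (built once by the same loop) plus a shift of the remaining bits (objective: alternative algorithm).

-- ===== PORT A =====
def pvPolynomA : Int := 0x04C11DB7

def calcCrc32Uint32_py (crc : Int) (data : Int) : Int :=
  (PySem.List.pyRange 0 32 1).foldl
    (fun c _ =>
      if PySem.Int.band c 128 ≠ 0 then PySem.Int.bxor (c <<< (1:Nat)) pvPolynomA else c <<< (1:Nat))
    (PySem.Int.bxor crc data)

-- ===== PORT B =====
def pvPolynomB : Int := 0x04C11DB7

-- Source B's _byte_crc: the same bit loop, run once per byte value to build the table
def pvByteCrc (b : Int) : Int :=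
  (PySem.List.pyRange 0 32 1).foldl
    (fun c _ =>
      if PySem.Int.band c 128 ≠ 0 then PySem.Int.bxor (c <<< (1:Nat)) pvPolynomB else c <<< (1:Nat))
    b

def pvTable : List Int := (PySem.List.pyRange 0 256 1).map pvByteCrc

def calcCrc32Uint32_py_alt (crc : Int) (data : Int) : Int :=
  let x := PySem.Int.bxor crc data
  PySem.Int.bxor ((x >>> (8:Nat)) <<< (40:Nat)) (PySem.List.pyGetD pvTable (PySem.Int.band x 255) 0)

-- ===== PRECONDITION & SPEC =====
def Spec_calcCrc32Uint32_py (crc : Int) (data : Int) (out : Int) : Prop := out = calcCrc32Uint32_py_alt crc data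
instance (crc : Int) (data : Int) (out : Int) : Decidable (Spec_calcCrc32Uint32_py crc data out) := by unfold Spec_calcCrc32Uint32_py; infer_instance

-- ===== CLAIM (what is proved, stated in full; the proofs are below) =====
def Claim_equal_calcCrc32Uint32_py : Prop := ∀ (crc : Int) (data : Int), Dom_calcCrc32Uint32_py crc data → Spec_calcCrc32Uint32_py crc data (calcCrc32Uint32_py crc data)

-- ===== LEMMAS AND PROOFS =====

-- The common CRC step
def pvStep (c : Int) : Int :=
  if PySem.Int.band c 128 ≠ 0 then PySem.Int.bxor (c <<< (1:Nat)) pvPolynomA else c <<< (1:Nat)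

theorem pv_foldl_eq_iterate (l : List Int) (x : Int) :
    l.foldl (fun c (_ : Int) => pvStep c) x = pvStep^[l.length] x := by
  induction l generalizing x with
  | nil => rfl
  | cons a t ih => simp [List.foldl, ih, Function.iterate_succ_apply]

-- evaluation of PySem.Int.bxor / PySem.Int.band on Int constructors
theorem pv_negOfNat_sub_one (x : Nat) : (-(x : Int)) - 1 = Int.negSucc x := by
  rw [Int.negSucc_eq]; omega

theorem pv_toNat_neg_negSucc (m : Nat) : (-(Int.negSucc m) - 1).toNat = m := by
  rw [Int.negSucc_eq]; omega

theorem pv_not_nonneg_negSucc (m : Nat) : ¬ (0 : Int) ≤ Int.negSucc m :=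
  not_le.mpr (Int.negSucc_lt_zero m)

theorem pv_bxor_nn (m n : Nat) : PySem.Int.bxor (Int.ofNat m) (Int.ofNat n) = Int.ofNat (m ^^^ n) := by
  simp [PySem.Int.bxor]

theorem pv_bxor_ns (m n : Nat) : PySem.Int.bxor (Int.ofNat m) (Int.negSucc n) = Int.negSucc (m ^^^ n) := by
  rw [PySem.Int.bxor, if_pos (show (0:Int) ≤ Int.ofNat m from Int.ofNat_le.mpr (Nat.zero_le m)),
      if_neg (pv_not_nonneg_negSucc n), pv_toNat_neg_negSucc]
  rw [show (Int.ofNat m).toNat = m from rfl, pv_negOfNat_sub_one]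

theorem pv_bxor_sn (m n : Nat) : PySem.Int.bxor (Int.negSucc m) (Int.ofNat n) = Int.negSucc (m ^^^ n) := by
  rw [PySem.Int.bxor, if_neg (pv_not_nonneg_negSucc m),
      if_pos (show (0:Int) ≤ Int.ofNat n from Int.ofNat_le.mpr (Nat.zero_le n)), pv_toNat_neg_negSucc]
  rw [show (Int.ofNat n).toNat = n from rfl, pv_negOfNat_sub_one]

theorem pv_bxor_ss (m n : Nat) : PySem.Int.bxor (Int.negSucc m) (Int.negSucc n) = Int.ofNat (m ^^^ n) := by
  rw [PySem.Int.bxor, if_neg (pv_not_nonneg_negSucc m), if_neg (pv_not_nonneg_negSucc n),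
      pv_toNat_neg_negSucc, pv_toNat_neg_negSucc]
  rfl

theorem pv_band_n255 (m : Nat) : PySem.Int.band (Int.ofNat m) 255 = Int.ofNat (m &&& 255) := by
  simp [PySem.Int.band]

theorem pv_band_s255 (m : Nat) : PySem.Int.band (Int.negSucc m) 255 = Int.ofNat (255 - (255 &&& m)) := by
  rw [PySem.Int.band, if_neg (pv_not_nonneg_negSucc m), if_pos (by norm_num), pv_toNat_neg_negSucc]
  rfl

theorem pv_band_n128 (m : Nat) : PySem.Int.band (Int.ofNat m) 128 = Int.ofNat (m &&& 128) := by
  simp [PySem.Int.band]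

theorem pv_band_s128 (m : Nat) : PySem.Int.band (Int.negSucc m) 128 = Int.ofNat (128 - (128 &&& m)) := by
  rw [PySem.Int.band, if_neg (pv_not_nonneg_negSucc m), if_pos (by norm_num), pv_toNat_neg_negSucc]
  rfl

-- testBit computation rules for Int constructors and the core Int shifts
theorem pv_tb_ofNat (m : Nat) (k : Nat) : (Int.ofNat m).testBit k = m.testBit k := rfl
theorem pv_tb_negSucc (m : Nat) (k : Nat) : (Int.negSucc m).testBit k = !m.testBit k := rfl
theorem pv_shl_ofNat (m : Nat) (n : Nat) : (Int.ofNat m) <<< n = Int.ofNat (m <<< n) := rfl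
theorem pv_shl_negSucc (m : Nat) (n : Nat) : (Int.negSucc m) <<< n = Int.negSucc ((m+1) <<< n - 1) := rfl
theorem pv_shr_ofNat (m : Nat) (n : Nat) : (Int.ofNat m) >>> n = Int.ofNat (m >>> n) := rfl
theorem pv_shr_negSucc (m : Nat) (n : Nat) : (Int.negSucc m) >>> n = Int.negSucc (m >>> n) := rfl

-- bits of ((m+1) <<< n) - 1 : n low ones, then the bits of m
theorem pv_nat_shl_pred_testBit (n m k : Nat) :
    ((m+1) <<< n - 1).testBit k = (decide (k < n) || m.testBit (k - n)) := by
  induction n generalizing k with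
  | zero => simp
  | succ n ih =>
    have h1 : (m+1) <<< (n+1) - 1 = 2 * ((m+1) <<< n - 1) + 1 := by
      have h2 : (m+1) <<< (n+1) = 2 * ((m+1) <<< n) := by
        simp [Nat.shiftLeft_succ, Nat.mul_comm]
      have h3 : 1 ≤ (m+1) <<< n := by
        rw [Nat.shiftLeft_eq]
        exact Nat.one_le_iff_ne_zero.mpr (by positivity)
      omega
    rw [h1]
    cases k with
    | zero => simp
    | succ k =>
      have h4 : (2 * ((m+1) <<< n - 1) + 1).testBit (k+1) = ((m+1) <<< n - 1).testBit k := by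
        rw [Nat.testBit_add_one]
        congr 1
        omega
      rw [h4, ih]
      simp only [Nat.succ_sub_succ]
      congr 1
      simp

theorem pv_tb_shl (a : Int) (n k : Nat) :
    (a <<< n).testBit k = (decide (n ≤ k) && a.testBit (k - n)) := by
  cases a with
  | ofNat m =>
    rw [pv_shl_ofNat, pv_tb_ofNat, pv_tb_ofNat, Nat.testBit_shiftLeft]
  | negSucc m =>
    rw [pv_shl_negSucc, pv_tb_negSucc, pv_tb_negSucc, pv_nat_shl_pred_testBit]
    by_cases h : n ≤ k
    · simp [h, Nat.not_lt.mpr h]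
    · simp [h, Nat.lt_of_not_le h]

theorem pv_tb_shr (a : Int) (n k : Nat) :
    (a >>> n).testBit k = a.testBit (k + n) := by
  cases a with
  | ofNat m =>
    rw [pv_shr_ofNat, pv_tb_ofNat, pv_tb_ofNat, Nat.testBit_shiftRight, Nat.add_comm]
  | negSucc m =>
    rw [pv_shr_negSucc, pv_tb_negSucc, pv_tb_negSucc, Nat.testBit_shiftRight, Nat.add_comm]

theorem pv_tb_big_false (m k : Nat) (h : m < k) : m.testBit k = false :=
  Nat.testBit_lt_two_pow (lt_of_lt_of_le (Nat.lt_two_pow_self) (Nat.pow_le_pow_right (by norm_num) (by omega)))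

-- Int extensionality through testBit
theorem pv_int_ext {a b : Int} (h : ∀ k, a.testBit k = b.testBit k) : a = b := by
  cases a with
  | ofNat m =>
    cases b with
    | ofNat n =>
      have : m = n := Nat.eq_of_testBit_eq fun k => by
        have hk := h k; rwa [pv_tb_ofNat, pv_tb_ofNat] at hk
      simp [this]
    | negSucc n =>
      exfalso
      have hk := h (m + n + 2)
      rw [pv_tb_ofNat, pv_tb_negSucc, pv_tb_big_false m _ (by omega),
          pv_tb_big_false n _ (by omega)] at hk
      simp at hk
  | negSucc m =>
    cases b with
    | ofNat n =>
      exfalso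
      have hk := h (m + n + 2)
      rw [pv_tb_negSucc, pv_tb_ofNat, pv_tb_big_false m _ (by omega),
          pv_tb_big_false n _ (by omega)] at hk
      simp at hk
    | negSucc n =>
      have : m = n := Nat.eq_of_testBit_eq fun k => by
        have hk := h k; rw [pv_tb_negSucc, pv_tb_negSucc] at hk
        exact Bool.not_inj hk
      simp [this]

-- bits of PySem.Int.bxor
theorem pv_tb_bxor (a b : Int) (k : Nat) :
    (PySem.Int.bxor a b).testBit k = xor (a.testBit k) (b.testBit k) := by
  cases a with
  | ofNat m =>
    cases b with
    | ofNat n =>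
      rw [pv_bxor_nn, pv_tb_ofNat, pv_tb_ofNat, pv_tb_ofNat, Nat.testBit_xor]
    | negSucc n =>
      rw [pv_bxor_ns, pv_tb_negSucc, pv_tb_ofNat, pv_tb_negSucc, Nat.testBit_xor]
      cases m.testBit k <;> cases n.testBit k <;> rfl
  | negSucc m =>
    cases b with
    | ofNat n =>
      rw [pv_bxor_sn, pv_tb_negSucc, pv_tb_negSucc, pv_tb_ofNat, Nat.testBit_xor]
      cases m.testBit k <;> cases n.testBit k <;> rfl
    | negSucc n =>
      rw [pv_bxor_ss, pv_tb_ofNat, pv_tb_negSucc, pv_tb_negSucc, Nat.testBit_xor]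
      cases m.testBit k <;> cases n.testBit k <;> rfl

-- band with 0x80 is the bit-7 test
theorem pv_band128 (c : Int) :
    PySem.Int.band c 128 = if c.testBit 7 then 128 else 0 := by
  cases c with
  | ofNat m =>
    rw [pv_band_n128, pv_tb_ofNat]
    have h : m &&& 128 = (m.testBit 7).toNat * 128 := Nat.and_two_pow m 7
    cases hb : m.testBit 7
    · rw [hb] at h; simp at h; rw [h]; rfl
    · rw [hb] at h; simp at h; rw [h]; rfl
  | negSucc m =>
    rw [pv_band_s128, pv_tb_negSucc]
    have h : 128 &&& m = (m.testBit 7).toNat * 128 := by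
      rw [Nat.and_comm]; exact Nat.and_two_pow m 7
    cases hb : m.testBit 7
    · rw [hb] at h; simp at h; rw [h]; rfl
    · rw [hb] at h; simp at h; rw [h]; rfl

theorem pv_band128_cond (c : Int) :
    (PySem.Int.band c 128 ≠ 0) ↔ c.testBit 7 = true := by
  rw [pv_band128]
  cases hb : c.testBit 7 <;> simp

-- bounded complement fact for the low byte, by enumeration
set_option maxRecDepth 40000 in
theorem pv_sub255 : ∀ y < 256, ∀ k < 8, (255 - y).testBit k = !y.testBit k := by decide

-- bits of band x 255: the low byte of x
theorem pv_tb_band255 (x : Int) (k : Nat) :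
    (PySem.Int.band x 255).testBit k = (decide (k < 8) && x.testBit k) := by
  cases x with
  | ofNat m =>
    rw [pv_band_n255, pv_tb_ofNat, pv_tb_ofNat, Nat.testBit_and]
    rw [show (255 : Nat) = 2 ^ 8 - 1 from by norm_num, Nat.testBit_two_pow_sub_one]
    exact Bool.and_comm _ _
  | negSucc m =>
    rw [pv_band_s255, pv_tb_ofNat, pv_tb_negSucc]
    have hle : 255 &&& m ≤ 255 := Nat.and_le_left
    by_cases hk : k < 8
    · rw [pv_sub255 (255 &&& m) (by omega) k hk]
      have h2 : (255 &&& m).testBit k = m.testBit k := by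
        rw [Nat.testBit_and, show (255 : Nat) = 2 ^ 8 - 1 from by norm_num,
            Nat.testBit_two_pow_sub_one]
        simp [hk]
      rw [h2]; simp [hk]
    · have h8 : (256:Nat) ≤ 2 ^ k :=
        le_trans (by norm_num : (256:Nat) ≤ 2 ^ 8) (Nat.pow_le_pow_right (by norm_num) (by omega : 8 ≤ k))
      have hlt : 255 - (255 &&& m) < 2 ^ k := by omega
      rw [Nat.testBit_lt_two_pow hlt]
      simp [hk]

-- range of the low byte
theorem pv_band255_range (x : Int) : 0 ≤ PySem.Int.band x 255 ∧ PySem.Int.band x 255 < 256 := by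
  cases x with
  | ofNat m =>
    rw [pv_band_n255]
    have h : m &&& 255 < 256 := Nat.lt_succ_of_le Nat.and_le_right
    refine ⟨Int.ofNat_le.mpr (Nat.zero_le _), ?_⟩
    rw [Int.ofNat_eq_natCast]
    exact_mod_cast h
  | negSucc m =>
    rw [pv_band_s255]
    have h : 255 - (255 &&& m) < 256 := by omega
    refine ⟨Int.ofNat_le.mpr (Nat.zero_le _), ?_⟩
    rw [Int.ofNat_eq_natCast]
    exact_mod_cast h

-- splitting an integer into its high part and its low byte
theorem pv_decomp (x : Int) :
    PySem.Int.bxor ((x >>> (8:Nat)) <<< (8:Nat)) (PySem.Int.band x 255) = x := by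
  apply pv_int_ext
  intro k
  rw [pv_tb_bxor, pv_tb_shl, pv_tb_shr, pv_tb_band255]
  by_cases hk : 8 ≤ k
  · have hkk : k - 8 + 8 = k := by omega
    simp [hk, hkk, Nat.not_lt.mpr hk]
  · simp [hk, Nat.lt_of_not_le hk]

-- XOR algebra of the step ingredients, all by bit extensionality
theorem pv_bxor_shl (a b : Int) :
    (PySem.Int.bxor a b) <<< (1:Nat) = PySem.Int.bxor (a <<< (1:Nat)) (b <<< (1:Nat)) := by
  apply pv_int_ext; intro k
  rw [pv_tb_shl, pv_tb_bxor, pv_tb_bxor, pv_tb_shl, pv_tb_shl]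
  cases hx : a.testBit (k-1) <;> cases hy : b.testBit (k-1) <;>
    cases hz : decide (1 ≤ k) <;> simp

theorem pv_bxor_pp (u v P : Int) :
    PySem.Int.bxor (PySem.Int.bxor u P) (PySem.Int.bxor v P) = PySem.Int.bxor u v := by
  apply pv_int_ext; intro k
  simp only [pv_tb_bxor]
  cases u.testBit k <;> cases v.testBit k <;> cases P.testBit k <;> rfl

theorem pv_bxor_right (u v P : Int) :
    PySem.Int.bxor (PySem.Int.bxor u v) P = PySem.Int.bxor (PySem.Int.bxor u P) v := by
  apply pv_int_ext; intro k
  simp only [pv_tb_bxor]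
  cases u.testBit k <;> cases v.testBit k <;> cases P.testBit k <;> rfl

theorem pv_bxor_left (u v P : Int) :
    PySem.Int.bxor (PySem.Int.bxor u v) P = PySem.Int.bxor u (PySem.Int.bxor v P) := by
  apply pv_int_ext; intro k
  simp only [pv_tb_bxor]
  cases u.testBit k <;> cases v.testBit k <;> cases P.testBit k <;> rfl

-- the step is XOR-linear
theorem pv_step_linear (a b : Int) :
    pvStep (PySem.Int.bxor a b) = PySem.Int.bxor (pvStep a) (pvStep b) := by
  unfold pvStep
  have hab : (PySem.Int.band (PySem.Int.bxor a b) 128 ≠ 0)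
      ↔ (xor (a.testBit 7) (b.testBit 7) = true) := by
    rw [pv_band128_cond, pv_tb_bxor]
  have ha := pv_band128_cond a
  have hb := pv_band128_cond b
  by_cases h1 : a.testBit 7 = true <;> by_cases h2 : b.testBit 7 = true
  · rw [if_neg (by rw [hab]; simp [h1, h2]), if_pos (ha.mpr h1), if_pos (hb.mpr h2),
        pv_bxor_shl, pv_bxor_pp]
  · rw [if_pos (by rw [hab]; simp [h1, h2]),
        if_pos (ha.mpr h1), if_neg (by rw [hb]; exact h2),
        pv_bxor_shl, pv_bxor_right]
  · rw [if_pos (by rw [hab]; simp [h1, h2]),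
        if_neg (by rw [ha]; exact h1), if_pos (hb.mpr h2),
        pv_bxor_shl, pv_bxor_left]
  · rw [if_neg (by rw [hab]; simp [h1, h2]),
        if_neg (by rw [ha]; exact h1), if_neg (by rw [hb]; exact h2),
        pv_bxor_shl]

theorem pv_iter_linear (n : Nat) (a b : Int) :
    pvStep^[n] (PySem.Int.bxor a b) = PySem.Int.bxor (pvStep^[n] a) (pvStep^[n] b) := by
  induction n generalizing a b with
  | zero => rfl
  | succ n ih =>
    rw [Function.iterate_succ_apply, Function.iterate_succ_apply, Function.iterate_succ_apply,
        pv_step_linear, ih]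

-- a value whose low byte is zero just shifts
theorem pv_step_hi (h : Int) (j : Nat) (hj : 8 ≤ j) :
    pvStep (h <<< j) = h <<< (j + 1) := by
  unfold pvStep
  rw [if_neg]
  · apply pv_int_ext
    intro k
    rw [pv_tb_shl, pv_tb_shl, pv_tb_shl]
    by_cases hk : j + 1 ≤ k
    · have h1 : 1 ≤ k := by omega
      have h2 : j ≤ k - 1 := by omega
      have h3 : k - 1 - j = k - (j + 1) := by omega
      simp [hk, h1, h2, h3]
    · by_cases h1 : 1 ≤ k
      · have h2 : ¬ j ≤ k - 1 := by omega
        simp [hk, h1, h2]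
      · simp [hk, h1]
  · rw [ne_eq, not_not, pv_band128, pv_tb_shl]
    simp [show ¬ j ≤ 7 from by omega]

theorem pv_iter_hi (n : Nat) (h : Int) :
    pvStep^[n] (h <<< (8:Nat)) = h <<< (8 + n) := by
  induction n with
  | zero => rfl
  | succ n ih =>
    rw [Function.iterate_succ_apply', ih, pv_step_hi h (8 + n) (by omega)]
    congr 1

-- the table lookup is the 32-step loop on the low byte
theorem pv_lookup (x : Int) :
    PySem.List.pyGetD pvTable (PySem.Int.band x 255) 0 = pvStep^[32] (PySem.Int.band x 255) := by
  have hr := pv_band255_range x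
  unfold pvTable
  rw [PySem.List.pyGetD_map_pyRange_of_nonneg pvByteCrc 256 (PySem.Int.band x 255) 0 hr.1 hr.2]
  unfold pvByteCrc
  have h := pv_foldl_eq_iterate (PySem.List.pyRange 0 32 1) (PySem.Int.band x 255)
  rw [show (PySem.List.pyRange 0 32 1).length = 32 from by decide] at h
  exact h

-- ===== VERDICT (by name: the statement is the Claim_ definition above) =====
theorem calcCrc32Uint32_py_spec : Claim_equal_calcCrc32Uint32_py := by
  intro crc data _
  unfold Spec_calcCrc32Uint32_py calcCrc32Uint32_py calcCrc32Uint32_py_alt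
  have hA : (PySem.List.pyRange 0 32 1).foldl
      (fun c _ =>
        if PySem.Int.band c 128 ≠ 0 then PySem.Int.bxor (c <<< (1:Nat)) pvPolynomA
        else c <<< (1:Nat))
      (PySem.Int.bxor crc data) = pvStep^[32] (PySem.Int.bxor crc data) := by
    have h := pv_foldl_eq_iterate (PySem.List.pyRange 0 32 1) (PySem.Int.bxor crc data)
    rw [show (PySem.List.pyRange 0 32 1).length = 32 from by decide] at h
    exact h
  rw [hA]
  show pvStep^[32] (PySem.Int.bxor crc data) =
    PySem.Int.bxor (((PySem.Int.bxor crc data) >>> (8:Nat)) <<< (40:Nat))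
      (PySem.List.pyGetD pvTable (PySem.Int.band (PySem.Int.bxor crc data) 255) 0)
  rw [pv_lookup]
  set x := PySem.Int.bxor crc data with hx
  conv_lhs => rw [← pv_decomp x]
  rw [pv_iter_linear, pv_iter_hi]
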